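-- pv_equiv track=rewrite | github.com/antmox/aofcode | oldevents/adv19.py | lsorbs
-- ===== SOURCE A (Python) =====
-- def lsorbs(orbits, d2root, obj):
--     if obj in d2root:
--         return d2root[obj]
--     if obj in orbits:
--         dobj = orbits[obj]
--         res = [dobj] + lsorbs(orbits, d2root, dobj)
--     else: res = []
--     d2root[obj] = res
--     return res
-- ===== SOURCE B (Python) =====
-- def lsorbs(orbits, d2root, obj):
--     # Iterative upward walk instead of recursion; same return value and same
--     # d2root memo writes as the recursive original (on acyclic inputs).
--     chain = []
--     cur = obj
--     while cur not in d2root and cur in orbits: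
--         chain.append(cur)
--         cur = orbits[cur]
--     if cur in d2root:
--         path = d2root[cur]
--     else:
--         path = []
--         d2root[cur] = path
--     for o in reversed(chain):
--         path = [orbits[o]] + path
--         d2root[o] = path
--     return path
-- ===== Notes on version B (the rewrite author's own statement) =====
-- stated objective: alternative
-- what changed: Replaces A's memoized recursion by an iterative upward walk that first collects the chain of unmemoized ancestors and then builds the path (and the same memo entries) back-to-front over the reversed chain.
-- outside the precondition, e.g. on lsorbs({'a': 'a'}, {}, 'a'): A raises RecursionError, B does not finish within the time limit
import Mathlib
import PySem

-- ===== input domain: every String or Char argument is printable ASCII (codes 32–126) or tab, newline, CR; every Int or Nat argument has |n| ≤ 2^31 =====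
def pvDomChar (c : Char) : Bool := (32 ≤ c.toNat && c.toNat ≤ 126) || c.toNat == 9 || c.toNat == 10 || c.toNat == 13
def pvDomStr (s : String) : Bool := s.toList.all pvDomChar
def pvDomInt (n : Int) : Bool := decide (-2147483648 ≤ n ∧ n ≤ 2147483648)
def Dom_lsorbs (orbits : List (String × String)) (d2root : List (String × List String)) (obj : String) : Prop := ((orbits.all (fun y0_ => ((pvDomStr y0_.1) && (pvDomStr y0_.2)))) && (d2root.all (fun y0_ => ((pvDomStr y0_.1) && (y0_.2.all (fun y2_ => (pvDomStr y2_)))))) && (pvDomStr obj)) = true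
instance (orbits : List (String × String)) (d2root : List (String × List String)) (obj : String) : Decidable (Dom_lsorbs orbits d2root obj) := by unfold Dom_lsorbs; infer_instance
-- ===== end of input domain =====

-- B replaces A's memoized recursion by an iterative upward walk (chain collection +
-- back-to-front rebuild); equivalence is about the RETURN value only — A mutates the
-- d2root dict in place, and B performs the same memo writes in Python.
-- Dict lookups are first-match on the association list (the Python dict convention here).

-- ===== PORT A =====
-- A's recursion descends along orbits without ever reading its own writes (each call
-- writes d2root only AFTER its recursive call returns), so the returned value is a
-- pure function of the original d2root; the in-place writes are therefore not threaded.
-- The recursion is not structural; fuel = orbits.length suffices under Pre_lsorbs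
-- (the fuel only decreases on a recursive step, so fuel 0 still answers memo/leaf cases).
def lsorbsA (orbits : List (String × String)) (d2root : List (String × List String)) : Nat → String → List String
  | f, obj =>
    match d2root.lookup obj with
    | some v => v                                   -- 'if obj in d2root: return d2root[obj]'
    | none =>
      match orbits.lookup obj, f with               -- 'if obj in orbits: …'
      | some dobj, g + 1 => dobj :: lsorbsA orbits d2root g dobj   -- res = [dobj] + lsorbs(…, dobj)
      | some _, 0 => []                             -- fuel exhausted: unreachable under Pre_lsorbs
      | none, _ => []                               -- 'else: res = []'

def lsorbs (orbits : List (String × String)) (d2root : List (String × List String)) (obj : String) : List String :=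
  lsorbsA orbits d2root orbits.length obj

-- ===== PORT B =====
-- the while loop: collect chain of unmemoized orbit keys, stop at a memoized or terminal object
def bwalk (orbits : List (String × String)) (d2root : List (String × List String)) : Nat → String → List String → (List String × String)
  | f, cur, chain =>
    if (d2root.lookup cur).isNone ∧ (orbits.lookup cur).isSome then
      match f with
      | g + 1 => bwalk orbits d2root g ((orbits.lookup cur).getD "") (chain ++ [cur])
      | 0 => (chain, cur)                           -- fuel exhausted: unreachable under Pre_lsorbs
    else (chain, cur)

def lsorbs_alt (orbits : List (String × String)) (d2root : List (String × List String)) (obj : String) : List String :=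
  let (chain, cur) := bwalk orbits d2root orbits.length obj []
  let path0 := (d2root.lookup cur).getD []          -- 'path = d2root[cur] if cur in d2root else []'
  chain.reverse.foldl (fun path o => (orbits.lookup o).getD "" :: path) path0   -- 'for o in reversed(chain): path = [orbits[o]] + path'

-- ===== PRECONDITION & SPEC =====
-- an object where the chain stops: already memoized in d2root, or not an orbits key
def pvStop (orbits : List (String × String)) (d2root : List (String × List String)) (x : String) : Bool :=
  (d2root.lookup x).isSome || (orbits.lookup x).isNone

-- the parent of an object along orbits (identity once the chain has stopped)
def pvNext (orbits : List (String × String)) (d2root : List (String × List String)) (x : String) : String :=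
  if pvStop orbits d2root x then x else (orbits.lookup x).getD ""

-- Pre_ excludes exactly the inputs on which A's recursion never terminates (Python raises
-- RecursionError on a cyclic orbit chain; B's while loop would spin there): the orbit chain
-- from obj reaches a memoized or terminal object within len(orbits) parent steps, which
-- holds for every input A returns on (a terminating chain visits distinct orbits keys).
def Pre_lsorbs (orbits : List (String × String)) (d2root : List (String × List String)) (obj : String) : Prop :=
  ∃ k ≤ orbits.length, pvStop orbits d2root ((pvNext orbits d2root)^[k] obj) = true
instance (orbits : List (String × String)) (d2root : List (String × List String)) (obj : String) : Decidable (Pre_lsorbs orbits d2root obj) := by unfold Pre_lsorbs; infer_instance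

def pvWitness_lsorbs : (List (String × String)) × (List (String × List String)) × String :=
  ([("YOU", "K"), ("K", "J"), ("J", "COM")], [("COM", [])], "YOU")

def Spec_lsorbs (orbits : List (String × String)) (d2root : List (String × List String)) (obj : String) (out : List String) : Prop := out = lsorbs_alt orbits d2root obj
instance (orbits : List (String × String)) (d2root : List (String × List String)) (obj : String) (out : List String) : Decidable (Spec_lsorbs orbits d2root obj out) := by unfold Spec_lsorbs; infer_instance

-- ===== CLAIM (what is proved, stated in full; the proofs are below) =====
def Claim_equal_lsorbs : Prop := ∀ (orbits : List (String × String)) (d2root : List (String × List String)) (obj : String), Dom_lsorbs orbits d2root obj → Pre_lsorbs orbits d2root obj → Spec_lsorbs orbits d2root obj (lsorbs orbits d2root obj)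

-- ===== LEMMAS AND PROOFS =====

-- fuel-indexed termination of the walk, as used by the inductions below
def pvTerm (orbits : List (String × String)) (d2root : List (String × List String)) : Nat → String → Bool
  | f, cur =>
    if (d2root.lookup cur).isNone ∧ (orbits.lookup cur).isSome then
      match f with
      | g + 1 => pvTerm orbits d2root g ((orbits.lookup cur).getD "")
      | 0 => false
    else true

theorem pvTerm_of_stop_iter (orbits : List (String × String)) (d2root : List (String × List String)) :
    ∀ (k f : Nat) (obj : String), k ≤ f →
      pvStop orbits d2root ((pvNext orbits d2root)^[k] obj) = true → pvTerm orbits d2root f obj = true := by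
  intro k
  induction k with
  | zero =>
    intro f obj _ hs
    simp only [Function.iterate_zero, id] at hs
    rw [pvTerm.eq_def]
    dsimp only
    rw [pvStop] at hs
    by_cases h : (d2root.lookup obj).isNone ∧ (orbits.lookup obj).isSome
    · exfalso
      rcases h with ⟨h1, h2⟩
      rw [Option.isNone_iff_eq_none] at h1
      rw [h1] at hs
      simp only [Option.isSome_none, Bool.false_or] at hs
      rw [Option.isNone_iff_eq_none] at hs
      rw [hs] at h2
      simp at h2
    · rw [if_neg h]
  | succ j ih =>
    intro f obj hkf hs
    rw [pvTerm.eq_def]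
    dsimp only
    by_cases h : (d2root.lookup obj).isNone ∧ (orbits.lookup obj).isSome
    · match f, hkf with
      | g + 1, hkf =>
        rw [if_pos h]
        apply ih g _ (Nat.le_of_succ_le_succ hkf)
        rw [Function.iterate_succ_apply] at hs
        have hnext : pvNext orbits d2root obj = (orbits.lookup obj).getD "" := by
          rw [pvNext, if_neg]
          rw [pvStop]
          simp [Option.isNone_iff_eq_none.mp h.1, Option.isSome_iff_ne_none.mp h.2]
        rwa [hnext] at hs
    · rw [if_neg h]

-- the result of B's reversed rebuild over the walk's output, as a function of walk state
def pvBuild (orbits : List (String × String)) (d2root : List (String × List String)) (p : List String × String) : List String :=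
  p.1.reverse.foldl (fun path o => (orbits.lookup o).getD "" :: path) ((d2root.lookup p.2).getD [])

theorem pvBuild_bwalk_eq (orbits : List (String × String)) (d2root : List (String × List String)) :
    ∀ (f : Nat) (obj : String) (acc : List String), pvTerm orbits d2root f obj = true →
      pvBuild orbits d2root (bwalk orbits d2root f obj acc) =
        acc.reverse.foldl (fun path o => (orbits.lookup o).getD "" :: path) (lsorbsA orbits d2root f obj) := by
  intro f
  induction f with
  | zero =>
    intro obj acc ht
    rw [pvTerm] at ht
    rcases hd : d2root.lookup obj with _ | v
    · rcases ho : orbits.lookup obj with _ | w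
      · simp [bwalk.eq_def, lsorbsA.eq_def, pvBuild, hd, ho]
      · simp [hd, ho] at ht
    · simp [bwalk.eq_def, lsorbsA.eq_def, pvBuild, hd]
  | succ g ih =>
    intro obj acc ht
    rw [pvTerm] at ht
    rcases hd : d2root.lookup obj with _ | v
    · rcases ho : orbits.lookup obj with _ | w
      · simp [bwalk.eq_def, lsorbsA.eq_def, pvBuild, hd, ho]
      · rw [hd, ho] at ht
        simp only [Option.isNone_none, Option.isSome_some, and_self, if_true] at ht
        rw [bwalk.eq_def, lsorbsA.eq_def]
        simp only [hd, ho, Option.isNone_none, Option.isSome_some, and_self, if_true,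
          Option.getD_some]
        simp only [Option.getD_some] at ht
        rw [ih _ _ ht]
        simp [List.reverse_append, ho]
    · simp [bwalk.eq_def, lsorbsA.eq_def, pvBuild, hd]

-- ===== VERDICT (by name: the statement is the Claim_ definition above) =====
theorem lsorbs_spec : Claim_equal_lsorbs := by
  intro orbits d2root obj _ hpre
  obtain ⟨k, hk, hs⟩ := hpre
  have hpre := pvTerm_of_stop_iter orbits d2root k orbits.length obj hk hs
  unfold Spec_lsorbs lsorbs lsorbs_alt
  have := pvBuild_bwalk_eq orbits d2root orbits.length obj [] hpre
  unfold pvBuild at this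
  simp only [List.reverse_nil, List.foldl_nil] at this
  exact this.symm
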